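-- pv_equiv track=rewrite | github.com/Carlosprimo/code_training_sofka | main.py | __Selection_word_with_highest_number_different_letters
-- ===== SOURCE A (Python) =====
-- def __Selection_word_with_highest_number_different_letters(
--         list_of_word: list) -> list:
--     """Select the set of words with the highest number of different letters
--
--     Args:
--         list_of_word (list): List of words
--
--     Returns:
--         list: List of words with the highest number of different letters
--     """
--     large = -1
--     wordlist_with_highest_number_different_letters = []
--     for word in list_of_word:
--         tam = len(set(list(word)))
--         if large < tam:
--             large = tam
--             wordlist_with_highest_number_different_letters = []
--         if large == tam:
--             wordlist_with_highest_number_different_letters.append(word)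
--
--     return wordlist_with_highest_number_different_letters
-- ===== SOURCE B (Python) =====
-- def __Selection_word_with_highest_number_different_letters(
--         list_of_word: list) -> list:
--     """Select the set of words with the highest number of different letters."""
--     if not list_of_word:
--         return []
--     counts = [len(set(word)) for word in list_of_word]
--     m = max(counts)
--     return [word for word, count in zip(list_of_word, counts) if count == m]
-- ===== Notes on version B (the rewrite author's own statement) =====
-- stated objective: simpler
-- what changed: Replaces A's single running-max pass with its -1 sentinel and list-reset logic by a two-pass compute-all-counts / max / filter structure (guarding the empty list).
import Mathlib
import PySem

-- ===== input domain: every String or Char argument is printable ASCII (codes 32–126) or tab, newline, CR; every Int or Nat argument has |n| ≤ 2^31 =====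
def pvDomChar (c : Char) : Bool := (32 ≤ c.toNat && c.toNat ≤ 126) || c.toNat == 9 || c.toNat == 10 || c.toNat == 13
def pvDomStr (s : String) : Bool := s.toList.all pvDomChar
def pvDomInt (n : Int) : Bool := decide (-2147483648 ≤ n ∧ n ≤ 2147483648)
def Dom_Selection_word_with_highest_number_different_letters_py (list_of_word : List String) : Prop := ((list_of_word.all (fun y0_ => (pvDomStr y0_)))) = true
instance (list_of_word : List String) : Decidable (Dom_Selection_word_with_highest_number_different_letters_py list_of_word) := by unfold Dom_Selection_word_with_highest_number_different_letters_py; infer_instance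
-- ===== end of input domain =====

-- B replaces A's running-max pass (with -1 sentinel and list-reset) by compute-all-counts, max, filter; objective: simpler.
-- ===== PORT A =====
def pvC (w : String) : Int := ((PySem.Set.ofList w.toList).length : Int)

def pvStepA (st : Int × List String) (word : String) : Int × List String :=
  let tam : Int := pvC word
  let st1 := if st.1 < tam then (tam, ([] : List String)) else st
  if st1.1 == tam then (st1.1, st1.2 ++ [word]) else st1

def Selection_word_with_highest_number_different_letters_py (list_of_word : List String) : List String :=
  (list_of_word.foldl pvStepA (-1, [])).2

-- ===== PORT B =====
def Selection_word_with_highest_number_different_letters_py_alt (list_of_word : List String) : List String :=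
  if list_of_word = [] then []
  else
    let counts := list_of_word.map pvC
    match PySem.List.max? counts (fun x => x) with
    | none => []
    | some m => ((list_of_word.zip counts).filter (fun p => p.2 == m)).map Prod.fst

-- ===== PRECONDITION & SPEC =====
def Spec_Selection_word_with_highest_number_different_letters_py (list_of_word : List String) (out : List String) : Prop := out = Selection_word_with_highest_number_different_letters_py_alt list_of_word
instance (list_of_word : List String) (out : List String) : Decidable (Spec_Selection_word_with_highest_number_different_letters_py list_of_word out) := by unfold Spec_Selection_word_with_highest_number_different_letters_py; infer_instance

-- ===== CLAIM (what is proved, stated in full; the proofs are below) =====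
def Claim_equal_Selection_word_with_highest_number_different_letters_py : Prop := ∀ (list_of_word : List String), Dom_Selection_word_with_highest_number_different_letters_py list_of_word → Spec_Selection_word_with_highest_number_different_letters_py list_of_word (Selection_word_with_highest_number_different_letters_py list_of_word)

-- ===== LEMMAS AND PROOFS =====
def pvM (g : Int) (l : List String) : Int := l.foldl (fun m w => max m (pvC w)) g

lemma pvM_ge (l : List String) : ∀ g : Int, g ≤ pvM g l := by
  induction l with
  | nil => intro g; simp [pvM]
  | cons w t ih =>
      intro g
      have := ih (max g (pvC w))
      simp only [pvM, List.foldl_cons] at *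
      exact le_trans (le_max_left _ _) this

lemma foldA_eq (l : List String) : ∀ (g : Int) (acc : List String),
    (l.foldl pvStepA (g, acc)).2 =
      (if pvM g l = g then acc else []) ++ l.filter (fun w => pvC w == pvM g l) := by
  induction l with
  | nil => intro g acc; simp [pvM]
  | cons w t ih =>
      intro g acc
      have hM : pvM g (w :: t) = pvM (max g (pvC w)) t := by simp [pvM]
      rcases lt_trichotomy g (pvC w) with h | h | h
      · -- reset branch
        have hmax : max g (pvC w) = pvC w := max_eq_right (le_of_lt h)
        have hstep : pvStepA (g, acc) w = (pvC w, [w]) := by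
          simp [pvStepA, h]
        have hMt : pvM g (w :: t) = pvM (pvC w) t := by rw [hM, hmax]
        have hge : pvC w ≤ pvM (pvC w) t := pvM_ge t _
        have hne : pvM (pvC w) t ≠ g := by omega
        rw [List.foldl_cons, hstep, ih, hMt]
        by_cases hc : pvM (pvC w) t = pvC w
        · simp [hc, List.filter_cons]
          intro h'
          exact absurd (hc.trans h') hne
        · have hnb : ¬ (pvC w == pvM (pvC w) t) = true := by
            simp only [beq_iff_eq]; exact fun h' => hc h'.symm
          simp [hc, hne, List.filter_cons, hnb]
      · -- equal branch
        have hmax : max g (pvC w) = g := by omega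
        have hstep : pvStepA (g, acc) w = (g, acc ++ [w]) := by
          simp [pvStepA, h, lt_irrefl]
        have hMt : pvM g (w :: t) = pvM g t := by rw [hM, hmax]
        rw [List.foldl_cons, hstep, ih, hMt]
        by_cases hc : pvM g t = g
        · have hb : (pvC w == pvM g t) = true := by simp [hc, ← h]
          simp [hc, List.filter_cons, hb, show pvC w = g from h.symm]
        · have hb : ¬ (pvC w == pvM g t) = true := by simp [← h]; omega
          simp [hc, List.filter_cons, hb]
      · -- smaller branch
        have hmax : max g (pvC w) = g := max_eq_left (le_of_lt h)
        have hstep : pvStepA (g, acc) w = (g, acc) := by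
          have h1 : ¬ g < pvC w := by omega
          have h2 : ¬ (g == pvC w) = true := by simp; omega
          simp [pvStepA, h1, h2]
        have hMt : pvM g (w :: t) = pvM g t := by rw [hM, hmax]
        have hge : g ≤ pvM g t := pvM_ge t g
        have : ¬ (pvC w == pvM g t) = true := by simp; omega
        rw [List.foldl_cons, hstep, ih, hMt]
        simp [List.filter_cons, this]

lemma zip_filter_eq (m : Int) (l : List String) :
    ((l.zip (l.map pvC)).filter (fun p => p.2 == m)).map Prod.fst =
      l.filter (fun w => pvC w == m) := by
  induction l with
  | nil => rfl
  | cons w t ih =>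
      simp only [List.map_cons, List.zip_cons_cons, List.filter_cons]
      by_cases h : (pvC w == m) = true
      · simp [h, ih]
      · simp [h, ih]

lemma pvC_nonneg (w : String) : 0 ≤ pvC w := by
  simp [pvC]

-- ===== VERDICT (by name: the statement is the Claim_ definition above) =====
theorem Selection_word_with_highest_number_different_letters_py_spec : Claim_equal_Selection_word_with_highest_number_different_letters_py := by
  intro l _
  unfold Spec_Selection_word_with_highest_number_different_letters_py
  unfold Selection_word_with_highest_number_different_letters_py
  unfold Selection_word_with_highest_number_different_letters_py_alt
  cases l with
  | nil => simp
  | cons w t =>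
      have hmax : PySem.List.max? ((w :: t).map pvC) (fun x => x) =
          some ((t.map pvC).foldl max (pvC w)) := by
        rw [List.map_cons]; exact @PySem.List.max?_id_cons Int _ (pvC w) (t.map pvC)
      have hfold : (t.map pvC).foldl max (pvC w) = pvM (pvC w) t := by
        simp [pvM, List.foldl_map]
      have hMc : pvM (-1) (w :: t) = pvM (pvC w) t := by
        have : max (-1 : Int) (pvC w) = pvC w := max_eq_right (by have := pvC_nonneg w; omega)
        simp [pvM, this]
      have hne : pvM (-1) (w :: t) ≠ -1 := by
        have h1 := pvM_ge t (pvC w)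
        have h2 := pvC_nonneg w
        rw [hMc]; omega
      rw [foldA_eq, if_neg hne]
      simp only [List.cons_ne_nil, hmax, hfold]
      rw [zip_filter_eq, hMc]
      simp
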